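-- pv_equiv track=rewrite | github.com/xkonjin/writing-improver | src/compression/kolmogorov_maximizer.py | _group_related
-- ===== SOURCE A (Python) =====
-- from typing import List, Dict, Any, Optional, Tuple
--
-- def _group_related(sentences: List[str]) -> List[List[str]]:
--     """Group related sentences for compression."""
--
--     groups = []
--     used = set()
--
--     for i, sent1 in enumerate(sentences):
--         if i in used:
--             continue
--
--         group = [sent1]
--         used.add(i)
--
--         # Find related sentences
--         sent1_terms = set(sent1.lower().split())
--
--         for j, sent2 in enumerate(sentences[i+1:], i+1):
--             if j in used:
--                 continue
--
--             sent2_terms = set(sent2.lower().split())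
--
--             # Check term overlap
--             overlap = len(sent1_terms & sent2_terms)
--
--             if overlap >= 3:  # Threshold for relatedness
--                 group.append(sent2)
--                 used.add(j)
--
--         groups.append(group)
--
--     return groups
-- ===== SOURCE B (Python) =====
-- from typing import List
--
-- def _group_related(sentences: List[str]) -> List[List[str]]:
--     """Group related sentences for compression."""
--     remaining = [(s, set(s.lower().split())) for s in sentences]
--     groups = []
--     while remaining:
--         (seed, seed_terms), rest = remaining[0], remaining[1:]
--         groups.append([seed] + [s for s, t in rest if len(seed_terms & t) >= 3])
--         remaining = [(s, t) for s, t in rest if len(seed_terms & t) < 3]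
--     return groups
-- ===== Notes on version B (the rewrite author's own statement) =====
-- stated objective: simpler
-- what changed: Replaces the index/used-set bookkeeping (enumerate over slices, skipping used indices) with a recursive partition of a shrinking list of (sentence, term-set) pairs: the head seeds a group, the rest is split by the >=3-shared-terms test, and the loop recurses on the unrelated part; term sets are computed once per sentence instead of repeatedly.
import Mathlib
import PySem

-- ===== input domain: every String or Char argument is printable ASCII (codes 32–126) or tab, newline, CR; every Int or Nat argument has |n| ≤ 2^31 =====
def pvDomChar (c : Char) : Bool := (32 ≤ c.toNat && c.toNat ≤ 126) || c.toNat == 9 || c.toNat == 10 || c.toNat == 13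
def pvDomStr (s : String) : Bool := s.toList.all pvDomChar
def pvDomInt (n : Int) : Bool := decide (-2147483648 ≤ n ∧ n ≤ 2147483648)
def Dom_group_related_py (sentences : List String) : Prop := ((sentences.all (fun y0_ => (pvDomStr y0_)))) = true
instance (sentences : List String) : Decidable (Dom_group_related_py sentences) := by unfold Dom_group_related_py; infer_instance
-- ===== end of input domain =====

-- B replaces A's index/used-set bookkeeping with a recursive partition of a list of
-- (sentence, term-set) pairs, computing each term set once (objective: simpler).

-- ===== PORT A =====
-- set(sent.lower().split())
def pvTerms (s : String) : PySem.Set String :=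
  PySem.Set.ofList (PySem.Str.split₀ (PySem.Str.lower s))

-- body of the inner 'for j, sent2 in enumerate(sentences[i+1:], i+1)' loop
def pvInnerStep (sent1_terms : PySem.Set String) (q : List String × PySem.Set Int)
    (r : Int × String) : List String × PySem.Set Int :=
  if PySem.Set.contains q.2 r.1 then q
  else
    let sent2_terms := pvTerms r.2
    let overlap : Int := PySem.Set.len (PySem.Set.inter sent1_terms sent2_terms)
    if 3 ≤ overlap then (q.1 ++ [r.2], PySem.Set.add q.2 r.1) else q

-- body of the outer 'for i, sent1 in enumerate(sentences)' loop
def pvOuterStep (sentences : List String) (st : List (List String) × PySem.Set Int)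
    (p : Int × String) : List (List String) × PySem.Set Int :=
  if PySem.Set.contains st.2 p.1 then st
  else
    let used := PySem.Set.add st.2 p.1
    let sent1_terms := pvTerms p.2
    let inner := (PySem.List.enumerate
        (PySem.List.slice sentences (some (p.1 + 1)) none) (p.1 + 1)).foldl
      (pvInnerStep sent1_terms) ([p.2], used)
    (st.1 ++ [inner.1], inner.2)

def group_related_py (sentences : List String) : List (List String) :=
  ((PySem.List.enumerate sentences 0).foldl (pvOuterStep sentences)
    ([], PySem.Set.empty)).1

-- ===== PORT B =====
-- the while loop of Source B: head seeds a group, rest is partitioned by the ≥3-shared-terms test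
def pvAltLoop : List (String × PySem.Set String) → List (List String)
  | [] => []
  | (seed, ts) :: rest =>
    ([seed] ++ (rest.filter
        (fun p => decide ((3 : Int) ≤ PySem.Set.len (PySem.Set.inter ts p.2)))).map (·.1))
      :: pvAltLoop (rest.filter
        (fun p => decide (PySem.Set.len (PySem.Set.inter ts p.2) < (3 : Int))))
termination_by l => l.length
decreasing_by simp only [List.length_unattach]; exact Nat.lt_succ_of_le (le_trans (List.length_filter_le _ _) (by simp))

def group_related_py_alt (sentences : List String) : List (List String) :=
  pvAltLoop (sentences.map (fun s => (s, pvTerms s)))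

-- ===== PRECONDITION & SPEC =====
def Spec_group_related_py (sentences : List String) (out : List (List String)) : Prop := out = group_related_py_alt sentences
instance (sentences : List String) (out : List (List String)) : Decidable (Spec_group_related_py sentences out) := by unfold Spec_group_related_py; infer_instance

-- ===== CLAIM (what is proved, stated in full; the proofs are below) =====
def Claim_equal_group_related_py : Prop := ∀ (sentences : List String), Dom_group_related_py sentences → Spec_group_related_py sentences (group_related_py sentences)

-- ===== LEMMAS AND PROOFS =====

-- proof-side abbreviations
def pvRel (t : PySem.Set String) (r : Int × String) : Bool :=
  decide ((3 : Int) ≤ PySem.Set.len (PySem.Set.inter t (pvTerms r.2)))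

def pvKeep (U : PySem.Set Int) (t : PySem.Set String) (r : Int × String) : Bool :=
  !PySem.Set.contains U r.1 && pvRel t r

def pvPairify (r : Int × String) : String × PySem.Set String := (r.2, pvTerms r.2)

lemma pvAltLoop_nil : pvAltLoop [] = [] := by rw [pvAltLoop]

lemma pvAltLoop_cons (seed : String) (ts : PySem.Set String)
    (rest : List (String × PySem.Set String)) :
    pvAltLoop ((seed, ts) :: rest)
      = ([seed] ++ (rest.filter
          (fun p => decide ((3 : Int) ≤ PySem.Set.len (PySem.Set.inter ts p.2)))).map (·.1))
        :: pvAltLoop (rest.filter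
          (fun p => decide (PySem.Set.len (PySem.Set.inter ts p.2) < (3 : Int)))) := by
  rw [pvAltLoop]

lemma pv_final (gs : List (List String)) (sk : String) (t : PySem.Set String)
    (M : List (Int × String)) (U : PySem.Set Int) :
    (gs ++ [[sk] ++ (M.filter (pvKeep U t)).map (·.2)]) ++
        pvAltLoop ((M.filter (fun r => !PySem.Set.contains U r.1 && !pvRel t r)).map pvPairify)
      = gs ++ pvAltLoop ((sk, t) :: (M.filter (fun r => !PySem.Set.contains U r.1)).map pvPairify) := by
  rw [pvAltLoop_cons]
  have hgrp : ∀ (N : List (Int × String)),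
      (((N.filter (fun r => !PySem.Set.contains U r.1)).map pvPairify).filter
        (fun p => decide ((3 : Int) ≤ PySem.Set.len (PySem.Set.inter t p.2)))).map (·.1)
      = (N.filter (pvKeep U t)).map (·.2) := by
    intro N
    induction N with
    | nil => rfl
    | cons r N ih =>
      by_cases hu : PySem.Set.contains U r.1 = true
      · have hcu : (!PySem.Set.contains U r.1) = false := by rw [hu]; rfl
        simp only [List.filter_cons, pvKeep, hcu, Bool.false_and, Bool.false_eq_true, if_false]
        exact ih
      · have hcu : (!PySem.Set.contains U r.1) = true := by
          rw [Bool.eq_false_iff.mpr hu]; rfl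
        by_cases hrel : (3 : Int) ≤ PySem.Set.len (PySem.Set.inter t (pvTerms r.2))
        · have hpr : pvRel t r = true := decide_eq_true hrel
          have hp : decide ((3 : Int) ≤ PySem.Set.len (PySem.Set.inter t (pvTerms r.2))) = true :=
            decide_eq_true hrel
          simp only [List.filter_cons, pvKeep, hcu, Bool.true_and, hpr, if_true,
            List.map_cons, pvPairify, hp]
          rw [ih]
        · have hpr : pvRel t r = false := decide_eq_false hrel
          have hp : decide ((3 : Int) ≤ PySem.Set.len (PySem.Set.inter t (pvTerms r.2))) = false :=
            decide_eq_false hrel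
          simp only [List.filter_cons, pvKeep, hcu, Bool.true_and, hpr, Bool.false_eq_true,
            if_false, if_true, List.map_cons, pvPairify, hp]
          exact ih
  have hrec : ∀ (N : List (Int × String)),
      ((N.filter (fun r => !PySem.Set.contains U r.1)).map pvPairify).filter
        (fun p => decide (PySem.Set.len (PySem.Set.inter t p.2) < (3 : Int)))
      = (N.filter (fun r => !PySem.Set.contains U r.1 && !pvRel t r)).map pvPairify := by
    intro N
    induction N with
    | nil => rfl
    | cons r N ih =>
      by_cases hu : PySem.Set.contains U r.1 = true
      · have hcu : (!PySem.Set.contains U r.1) = false := by rw [hu]; rfl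
        simp only [List.filter_cons, hcu, Bool.false_and, Bool.false_eq_true, if_false]
        exact ih
      · have hcu : (!PySem.Set.contains U r.1) = true := by
          rw [Bool.eq_false_iff.mpr hu]; rfl
        by_cases hrel : (3 : Int) ≤ PySem.Set.len (PySem.Set.inter t (pvTerms r.2))
        · have hpr : pvRel t r = true := decide_eq_true hrel
          have hq : decide (PySem.Set.len (PySem.Set.inter t (pvTerms r.2)) < (3 : Int)) = false :=
            decide_eq_false (not_lt.mpr hrel)
          simp only [List.filter_cons, hcu, Bool.true_and, hpr, Bool.not_true,
            Bool.false_eq_true, if_false, if_true, List.map_cons, pvPairify, hq]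
          exact ih
        · have hpr : pvRel t r = false := decide_eq_false hrel
          have hq : decide (PySem.Set.len (PySem.Set.inter t (pvTerms r.2)) < (3 : Int)) = true :=
            decide_eq_true (not_le.mp hrel)
          simp only [List.filter_cons, hcu, Bool.true_and, hpr, Bool.not_false, if_true,
            List.map_cons, pvPairify, hq]
          rw [ih]
  rw [hgrp M, hrec M, List.append_assoc]
  rfl

lemma pv_fst_inj : ∀ (M : List (Int × String)),
    M.Pairwise (fun a b => a.1 < b.1) →
    ∀ r ∈ M, ∀ q ∈ M, r.1 = q.1 → r = q := by
  intro M
  induction M with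
  | nil => simp
  | cons x M ih =>
    intro hp r hr q hq he
    rcases List.pairwise_cons.mp hp with ⟨hx, hM⟩
    rcases List.mem_cons.mp hr with hre | hr <;> rcases List.mem_cons.mp hq with hqe | hq
    · rw [hre, hqe]
    · exact absurd he (by rw [hre]; exact ne_of_lt (hx q hq))
    · exact absurd he (by rw [hqe]; exact (ne_of_lt (hx r hr)).symm)
    · exact ih hM r hr q hq he

lemma pv_inner_eq (t : PySem.Set String) (U : PySem.Set Int) :
    ∀ (M : List (Int × String)) (g : List String) (U' : PySem.Set Int),
    M.Pairwise (fun a b => a.1 < b.1) →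
    (∀ r ∈ M, (r.1 ∈ U' ↔ r.1 ∈ U)) →
    M.foldl (pvInnerStep t) (g, U')
      = (g ++ (M.filter (pvKeep U t)).map (·.2),
         PySem.Set.update U' ((M.filter (pvKeep U t)).map (·.1))) := by
  intro M
  induction M with
  | nil => intro g U' _ _; simp
  | cons r M ih =>
    intro g U' hp hU
    have hpt : M.Pairwise (fun a b => a.1 < b.1) := (List.pairwise_cons.mp hp).2
    have hhead : ∀ q ∈ M, r.1 < q.1 := (List.pairwise_cons.mp hp).1
    by_cases hmem : r.1 ∈ U
    · have hc : PySem.Set.contains U' r.1 = true :=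
        (PySem.Set.contains_iff _ _).mpr ((hU r (by simp)).mpr hmem)
      have hcU : PySem.Set.contains U r.1 = true := (PySem.Set.contains_iff _ _).mpr hmem
      have hk : pvKeep U t r = false := by
        rw [pvKeep, hcU]; simp
      simp only [List.foldl_cons, pvInnerStep, hc, if_true, List.filter_cons, hk,
        Bool.false_eq_true, if_false]
      exact ih g U' hpt (fun q hq => hU q (by simp [hq]))
    · have hc : PySem.Set.contains U' r.1 = false := by
        rw [Bool.eq_false_iff]
        intro h
        exact hmem ((hU r (by simp)).mp ((PySem.Set.contains_iff _ _).mp h))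
      have hcU : PySem.Set.contains U r.1 = false := by
        rw [Bool.eq_false_iff]
        intro h
        exact hmem ((PySem.Set.contains_iff _ _).mp h)
      by_cases hrel : (3 : Int) ≤ PySem.Set.len (PySem.Set.inter t (pvTerms r.2))
      · have hk : pvKeep U t r = true := by
          rw [pvKeep, hcU, pvRel]; simp only [Bool.not_false, Bool.true_and]
          exact decide_eq_true hrel
        have hU' : ∀ q ∈ M, (q.1 ∈ PySem.Set.add U' r.1 ↔ q.1 ∈ U) := by
          intro q hq
          rw [PySem.Set.mem_add]
          constructor
          · rintro (h | h)
            · exact (hU q (by simp [hq])).mp h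
            · exact absurd h (by have := hhead q hq; omega)
          · exact fun h => Or.inl ((hU q (by simp [hq])).mpr h)
        simp only [List.foldl_cons, pvInnerStep, hc, Bool.false_eq_true, if_false,
          if_pos hrel, List.filter_cons, hk, if_true]
        rw [ih (g ++ [r.2]) (PySem.Set.add U' r.1) hpt hU']
        simp
      · have hk : pvKeep U t r = false := by
          rw [pvKeep, hcU, pvRel]; simp only [Bool.not_false, Bool.true_and]
          exact decide_eq_false hrel
        simp only [List.foldl_cons, pvInnerStep, hc, Bool.false_eq_true, if_false,
          if_neg hrel, List.filter_cons, hk, if_false]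
        exact ih g U' hpt (fun q hq => hU q (by simp [hq]))

lemma pv_enum_drop (xs : List String) (k : Nat) (h : k ≤ xs.length) :
    (PySem.List.enumerate xs 0).drop k = PySem.List.enumerate (xs.drop k) (k : Int) := by
  conv_lhs => rw [← List.take_append_drop k xs]
  rw [PySem.List.enumerate_append]
  rw [List.drop_left' (by rw [PySem.List.length_enumerate]; exact List.length_take_of_le h)]
  simp [List.length_take_of_le h]

set_option maxHeartbeats 1000000 in
lemma pv_outer_eq (sentences : List String) :
    ∀ (n k : Nat) (gs : List (List String)) (U : PySem.Set Int),
    sentences.length - k = n →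
    (((PySem.List.enumerate sentences 0).drop k).foldl (pvOuterStep sentences) (gs, U)).1
      = gs ++ pvAltLoop ((((PySem.List.enumerate sentences 0).drop k).filter
          (fun r => !PySem.Set.contains U r.1)).map pvPairify) := by
  intro n
  induction n with
  | zero =>
    intro k gs U hk
    have hnil : (PySem.List.enumerate sentences 0).drop k = [] := by
      apply List.drop_eq_nil_of_le
      rw [PySem.List.length_enumerate]; omega
    simp [hnil, pvAltLoop_nil]
  | succ n ih =>
    intro k gs U hk
    have hklt : k < sentences.length := by omega
    set t := pvTerms sentences[k] with ht
    set M := PySem.List.enumerate (sentences.drop (k + 1)) ((k : Int) + 1) with hM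
    have hdropk : (PySem.List.enumerate sentences 0).drop k
        = ((k : Int), sentences[k]) :: M := by
      rw [pv_enum_drop _ k hklt.le, List.drop_eq_getElem_cons hklt,
        PySem.List.enumerate_cons]
    have hdropk1 : (PySem.List.enumerate sentences 0).drop (k + 1) = M := by
      rw [pv_enum_drop _ (k + 1) (by omega)]
      push_cast
      rfl
    have hMgt : ∀ r ∈ M, (k : Int) < r.1 := by
      intro r hr
      rw [hM, PySem.List.mem_enumerate_iff] at hr
      obtain ⟨m, hm, rfl⟩ := hr
      simp; omega
    have hMp : M.Pairwise (fun a b => a.1 < b.1) := PySem.List.pairwise_lt_enumerate ..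
    rw [hdropk]
    by_cases hused : (k : Int) ∈ U
    · have hc : PySem.Set.contains U (k : Int) = true := (PySem.Set.contains_iff _ _).mpr hused
      simp only [List.foldl_cons, pvOuterStep, hc, if_true, List.filter_cons,
        Bool.not_true, Bool.false_eq_true, if_false]
      rw [← hdropk1, ih (k + 1) gs U (by omega), hdropk1]
    · have hc : PySem.Set.contains U (k : Int) = false := by
        rw [Bool.eq_false_iff]; intro h
        exact hused ((PySem.Set.contains_iff _ _).mp h)
      have hslice : PySem.List.slice sentences (some ((k : Int) + 1)) none
          = sentences.drop (k + 1) := by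
        have : ((k : Int) + 1) = ((k + 1 : Nat) : Int) := by push_cast; ring
        rw [this, PySem.List.slice_from_natCast]
      have hU' : ∀ r ∈ M, (r.1 ∈ PySem.Set.add U (k : Int) ↔ r.1 ∈ U) := by
        intro r hr
        rw [PySem.Set.mem_add]
        constructor
        · rintro (h | h)
          · exact h
          · exact absurd h (by have := hMgt r hr; omega)
        · exact Or.inl
      simp only [List.foldl_cons, pvOuterStep, hc, Bool.false_eq_true, if_false]
      rw [hslice, ← hM, pv_inner_eq t U M [sentences[k]] (PySem.Set.add U (k : Int)) hMp hU']
      rw [← hdropk1, ih (k + 1) _ _ (by omega), hdropk1]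
      -- characterize membership in the final used set
      set W : PySem.Set Int := PySem.Set.update (PySem.Set.add U (k : Int))
          ((M.filter (pvKeep U t)).map (·.1)) with hW
      have husedchar : ∀ r ∈ M,
          (!PySem.Set.contains W r.1)
            = (!PySem.Set.contains U r.1 && !pvRel t r) := by
        intro r hr
        have hne : r.1 ≠ (k : Int) := by have := hMgt r hr; omega
        have hidx : r.1 ∈ (M.filter (pvKeep U t)).map (·.1) ↔ pvKeep U t r = true := by
          constructor
          · intro h
            obtain ⟨q, hq, hqe⟩ := List.mem_map.mp h
            obtain ⟨hqM, hqk⟩ := List.mem_filter.mp hq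
            have := pv_fst_inj M hMp q hqM r hr hqe
            rwa [← this]
          · intro h
            exact List.mem_map.mpr ⟨r, List.mem_filter.mpr ⟨hr, h⟩, rfl⟩
        by_cases hrU : r.1 ∈ U
        · have h1 : PySem.Set.contains U r.1 = true := (PySem.Set.contains_iff _ _).mpr hrU
          have h2 : PySem.Set.contains W r.1 = true :=
            (PySem.Set.contains_iff W r.1).mpr
              ((PySem.Set.mem_update _ _ _).mpr (Or.inl ((PySem.Set.mem_add _ _ _).mpr (Or.inl hrU))))
          rw [h1, h2]; simp
        · have h1 : PySem.Set.contains U r.1 = false := by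
            rw [Bool.eq_false_iff]; intro h
            exact hrU ((PySem.Set.contains_iff _ _).mp h)
          by_cases hrel : pvRel t r = true
          · have hkeep : pvKeep U t r = true := by
              rw [pvKeep, h1, hrel]; rfl
            have h2 : PySem.Set.contains W r.1 = true :=
              (PySem.Set.contains_iff W r.1).mpr
                ((PySem.Set.mem_update _ _ _).mpr (Or.inr (hidx.mpr hkeep)))
            rw [h2, h1, hrel]; simp
          · have hkeep : pvKeep U t r = false := by
              rw [pvKeep, Bool.eq_false_iff.mpr hrel]; simp
            have h2 : PySem.Set.contains W r.1 = false := by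
              rw [Bool.eq_false_iff]; intro h
              rcases (PySem.Set.mem_update _ _ _).mp ((PySem.Set.contains_iff W r.1).mp h) with h' | h'
              · rcases (PySem.Set.mem_add _ _ _).mp h' with h'' | h''
                · exact hrU h''
                · exact hne h''
              · rw [hidx] at h'; rw [hkeep] at h'; exact absurd h' (by simp)
            rw [h2, h1, Bool.eq_false_iff.mpr hrel]; simp
      rw [List.filter_congr husedchar]
      -- unfold one step of pvAltLoop on the B side
      have hfcons : ((((k : Int), sentences[k]) :: M).filter
            (fun r => !PySem.Set.contains U r.1)).map pvPairify
          = (sentences[k], t) :: ((M.filter (fun r => !PySem.Set.contains U r.1)).map pvPairify) := by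
        simp [hused, pvPairify, ht]
      rw [hfcons]
      exact pv_final gs (sentences[k]) t M U

-- ===== VERDICT (by name: the statement is the Claim_ definition above) =====
theorem group_related_py_spec : Claim_equal_group_related_py := by
  intro sentences _
  unfold Spec_group_related_py group_related_py group_related_py_alt
  have := pv_outer_eq sentences sentences.length 0 [] PySem.Set.empty (by omega)
  simp only [List.drop_zero] at this
  rw [this]
  have hall : ∀ r ∈ PySem.List.enumerate sentences 0,
      (!PySem.Set.contains PySem.Set.empty r.1) = true := by
    intro r _; rfl
  rw [List.filter_congr hall, List.filter_true]
  have : (PySem.List.enumerate sentences 0).map pvPairify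
      = sentences.map (fun s => (s, pvTerms s)) := by
    have h2 := PySem.List.map_snd_enumerate sentences (0 : Int)
    calc (PySem.List.enumerate sentences 0).map pvPairify
        = ((PySem.List.enumerate sentences 0).map (·.2)).map (fun s => (s, pvTerms s)) := by
          rw [List.map_map]; rfl
      _ = sentences.map (fun s => (s, pvTerms s)) := by rw [h2]
  rw [this, List.nil_append]
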